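-- pv_equiv track=rewrite | github.com/jackleegithub/python | BaiduImage/getImageFromBaiduImage.py | decipherUrl
-- ===== SOURCE A (Python) =====
-- def decipherUrl(encryptUrl):
--     decipherUrl = encryptUrl
--     dictStr = {'_z2C$q':':', '_z&e3B':'.', 'AzdH3F':'/'}
--     dictChar={
--         'w' : 'a',
--         'k' : 'b',
--         'v' : 'c',
--         '1' : 'd',
--         'j' : 'e',
--         'u' : 'f',
--         '2' : 'g',
--         'i' : 'h',
--         't' : 'i',
--         '3' : 'j',
--         'h' : 'k',
--         's' : 'l',
--         '4' : 'm',
--         'g' : 'n',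
--         '5' : 'o',
--         'r' : 'p',
--         'q' : 'q',
--         '6' : 'r',
--         'f' : 's',
--         'p' : 't',
--         '7' : 'u',
--         'e' : 'v',
--         'o' : 'w',
--         '8' : '1',
--         'd' : '2',
--         'n' : '3',
--         '9' : '4',
--         'c' : '5',
--         'm' : '6',
--         '0' : '7',
--         'b' : '8',
--         'l' : '9',
--         'a' : '0'
--     }
--     dictChar = {ord(key):value for key, value in dictChar.items()}
--     for k, v in dictStr.items():
--         decipherUrl = decipherUrl.replace(k, v)
--     decipherUrl = decipherUrl.translate(dictChar)
--
--     return decipherUrl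
-- ===== SOURCE B (Python) =====
-- def decipherUrl(encryptUrl):
--     # One left-to-right pass: at each position either a 6-char token becomes its
--     # punctuation mark, or the single character is mapped through the table.
--     tokens = (('_z2C$q', ':'), ('_z&e3B', '.'), ('AzdH3F', '/'))
--     charMap = {
--         'w': 'a', 'k': 'b', 'v': 'c', '1': 'd', 'j': 'e', 'u': 'f', '2': 'g',
--         'i': 'h', 't': 'i', '3': 'j', 'h': 'k', 's': 'l', '4': 'm', 'g': 'n',
--         '5': 'o', 'r': 'p', 'q': 'q', '6': 'r', 'f': 's', 'p': 't', '7': 'u',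
--         'e': 'v', 'o': 'w', '8': '1', 'd': '2', 'n': '3', '9': '4', 'c': '5',
--         'm': '6', '0': '7', 'b': '8', 'l': '9', 'a': '0',
--     }
--     out = []
--     i = 0
--     n = len(encryptUrl)
--     while i < n:
--         for tok, mark in tokens:
--             if encryptUrl.startswith(tok, i):
--                 out.append(mark)
--                 i += 6
--                 break
--         else:
--             ch = encryptUrl[i]
--             out.append(charMap.get(ch, ch))
--             i += 1
--     return ''.join(out)
-- ===== Notes on version B (the rewrite author's own statement) =====
-- stated objective: alternative
-- what changed: A makes three sequential whole-string replace passes and then a translate pass; B is a single left-to-right scan that at each position either matches one of the three 6-char tokens (emitting its punctuation) or maps the single character through the table.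
import Mathlib
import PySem

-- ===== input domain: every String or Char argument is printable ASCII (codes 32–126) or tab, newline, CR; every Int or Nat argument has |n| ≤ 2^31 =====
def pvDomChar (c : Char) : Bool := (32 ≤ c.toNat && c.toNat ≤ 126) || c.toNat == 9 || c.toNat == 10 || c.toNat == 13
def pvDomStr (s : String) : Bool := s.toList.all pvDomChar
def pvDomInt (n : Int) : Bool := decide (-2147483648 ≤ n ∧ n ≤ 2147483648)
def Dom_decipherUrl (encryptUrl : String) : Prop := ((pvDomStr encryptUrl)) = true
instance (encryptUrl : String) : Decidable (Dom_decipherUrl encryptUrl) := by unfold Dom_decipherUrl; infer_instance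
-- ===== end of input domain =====

-- B replaces A's three sequential global replace passes + translate by a single
-- left-to-right scan over the string (alternative decomposition, same exact result).


-- ===== PORT A =====
-- dictChar after A's ord-keyed comprehension: code point (Int) → replacement string
def pvDictCharA : PySem.Dict Int String := PySem.Dict.ofList
  [(119, "a"), (107, "b"), (118, "c"), (49, "d"), (106, "e"), (117, "f"), (50, "g"),
   (105, "h"), (116, "i"), (51, "j"), (104, "k"), (115, "l"), (52, "m"), (103, "n"),
   (53, "o"), (114, "p"), (113, "q"), (54, "r"), (102, "s"), (112, "t"), (55, "u"),
   (101, "v"), (111, "w"), (56, "1"), (100, "2"), (110, "3"), (57, "4"), (99, "5"),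
   (109, "6"), (48, "7"), (98, "8"), (108, "9"), (97, "0")]

def pvDictStrA : PySem.Dict String String :=
  PySem.Dict.ofList [("_z2C$q", ":"), ("_z&e3B", "."), ("AzdH3F", "/")]

-- str.translate(dictChar) on one char: a keyed char becomes its value string, others stay
def pvTranslateA (c : Char) : List Char :=
  match pvDictCharA.get? (c.toNat : Int) with
  | some v => v.toList
  | none => [c]

def decipherUrl (encryptUrl : String) : String :=
  -- for k, v in dictStr.items(): decipherUrl = decipherUrl.replace(k, v)
  let d1 := pvDictStrA.items.foldl (fun s kv => PySem.Str.replace s kv.1 kv.2) encryptUrl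
  -- decipherUrl = decipherUrl.translate(dictChar)
  String.ofList (d1.toList.flatMap pvTranslateA)

-- ===== PORT B =====
-- B's charMap: single chars to single chars
def pvCharMapB : PySem.Dict Char Char := PySem.Dict.ofList
  [('w', 'a'), ('k', 'b'), ('v', 'c'), ('1', 'd'), ('j', 'e'), ('u', 'f'), ('2', 'g'),
   ('i', 'h'), ('t', 'i'), ('3', 'j'), ('h', 'k'), ('s', 'l'), ('4', 'm'), ('g', 'n'),
   ('5', 'o'), ('r', 'p'), ('q', 'q'), ('6', 'r'), ('f', 's'), ('p', 't'), ('7', 'u'),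
   ('e', 'v'), ('o', 'w'), ('8', '1'), ('d', '2'), ('n', '3'), ('9', '4'), ('c', '5'),
   ('m', '6'), ('0', '7'), ('b', '8'), ('l', '9'), ('a', '0')]

-- charMap.get(ch, ch)
def pvTrB (c : Char) : Char := (pvCharMapB.get? c).getD c

-- B's single scan: at each position a token test (encryptUrl.startswith(tok, i)),
-- else one char through the table
def pvScanB (l : List Char) : List Char :=
  match l with
  | [] => []
  | c :: t =>
    if PySem.Chars.startswith (c :: t) "_z2C$q".toList then ':' :: pvScanB (t.drop 5)
    else if PySem.Chars.startswith (c :: t) "_z&e3B".toList then '.' :: pvScanB (t.drop 5)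
    else if PySem.Chars.startswith (c :: t) "AzdH3F".toList then '/' :: pvScanB (t.drop 5)
    else pvTrB c :: pvScanB t
termination_by l.length
decreasing_by all_goals (simp; try omega)

def decipherUrl_alt (encryptUrl : String) : String :=
  String.ofList (pvScanB encryptUrl.toList)

-- ===== PRECONDITION & SPEC =====
def Spec_decipherUrl (encryptUrl : String) (out : String) : Prop := out = decipherUrl_alt encryptUrl
instance (encryptUrl : String) (out : String) : Decidable (Spec_decipherUrl encryptUrl out) := by unfold Spec_decipherUrl; infer_instance

-- ===== CLAIM (what is proved, stated in full; the proofs are below) =====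
def Claim_equal_decipherUrl : Prop := ∀ (encryptUrl : String), Dom_decipherUrl encryptUrl → Spec_decipherUrl encryptUrl (decipherUrl encryptUrl)

-- ===== LEMMAS AND PROOFS =====

-- clean structural form of Python's str.replace (nonempty pattern)
def pvRep (old new : List Char) (l : List Char) : List Char :=
  match l with
  | [] => []
  | c :: t =>
    if old <+: (c :: t) then new ++ pvRep old new (t.drop (old.length - 1))
    else c :: pvRep old new t
termination_by l.length
decreasing_by all_goals (simp; try omega)

theorem pvRep_nil (old new : List Char) : pvRep old new [] = [] := by
  rw [pvRep]

theorem pvRep_pos (old new : List Char) (c : Char) (t : List Char)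
    (h : old <+: (c :: t)) :
    pvRep old new (c :: t) = new ++ pvRep old new (t.drop (old.length - 1)) := by
  rw [pvRep]; simp [h]

theorem pvRep_neg (old new : List Char) (c : Char) (t : List Char)
    (h : ¬ old <+: (c :: t)) :
    pvRep old new (c :: t) = c :: pvRep old new t := by
  rw [pvRep]; simp [h]

-- go of PySem.Chars.replace computes pvRep
theorem pvGo_eq (old new : List Char) (hold : old ≠ []) :
    ∀ (fuel : Nat) (l acc : List Char), l.length ≤ fuel →
      PySem.Chars.replace.go old new fuel l acc = acc.reverse ++ pvRep old new l := by
  intro fuel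
  induction fuel with
  | zero =>
    intro l acc hl
    have : l = [] := by cases l <;> simp_all
    subst this
    simp [PySem.Chars.replace.go, pvRep_nil]
  | succ n ih =>
    intro l acc hl
    cases l with
    | nil => simp [PySem.Chars.replace.go, pvRep_nil]
    | cons c t =>
      rw [PySem.Chars.replace.go]
      simp only [List.length_cons, Nat.succ_le_succ_iff] at hl
      by_cases h : old <+: (c :: t)
      · rw [if_pos (List.isPrefixOf_iff_prefix.mpr h)]
        obtain ⟨k, hk⟩ : ∃ k, old.length = k + 1 := by
          cases old with
          | nil => exact absurd rfl hold
          | cons a as => exact ⟨as.length, by simp⟩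
        have hdrop : List.drop old.length (c :: t) = t.drop (old.length - 1) := by
          rw [hk]; simp
        rw [hdrop, ih _ _ (by simp only [List.length_drop]; omega)]
        rw [pvRep_pos old new c t h]
        simp
      · rw [if_neg (by simpa [List.isPrefixOf_iff_prefix] using h)]
        rw [ih _ _ (by omega)]
        rw [pvRep_neg old new c t h]
        simp

theorem pvReplace_eq (old new l : List Char) (hold : old ≠ []) :
    PySem.Chars.replace l old new = pvRep old new l := by
  rw [PySem.Chars.replace]
  rw [if_neg (by simpa [List.isEmpty_iff] using hold)]
  simpa using pvGo_eq old new hold l.length l [] (le_refl _)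

-- a prefix of the output of a singleton-replacement pass, free of the replacement
-- char, was already a prefix of the input
theorem pvPrefix_rep (old : List Char) (rc : Char) :
    ∀ (u : List Char), rc ∉ u →
      ∀ (l : List Char), u <+: pvRep old [rc] l → u <+: l := by
  intro u
  induction u with
  | nil => intro _ l _; exact List.nil_prefix
  | cons d u' ih =>
    intro hrc l h
    simp only [List.mem_cons, not_or] at hrc
    cases l with
    | nil => rw [pvRep_nil] at h; exact absurd (List.eq_nil_of_prefix_nil h) (by simp)
    | cons c t =>
      by_cases hg : old <+: (c :: t)
      · rw [pvRep_pos old [rc] c t hg] at h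
        rw [List.singleton_append, List.cons_prefix_cons] at h
        exact absurd h.1.symm hrc.1
      · rw [pvRep_neg old [rc] c t hg] at h
        rw [List.cons_prefix_cons] at h ⊢
        exact ⟨h.1, ih hrc.2 t h.2⟩

-- the three tokens as char lists
def pvT1 : List Char := ['_','z','2','C','$','q']
def pvT2 : List Char := ['_','z','&','e','3','B']
def pvT3 : List Char := ['A','z','d','H','3','F']

-- A's per-char translation equals B's table lookup
set_option maxHeartbeats 2000000 in
theorem pvTrA_eq (c : Char) : pvTranslateA c = [pvTrB c] := by
  have key : ∀ (n : Int) (ch : Char), (ch.toNat : Int) = n →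
      ((n == ((c.toNat : Int))) = (ch == c)) := by
    intro n ch hn
    subst hn
    by_cases hc : ch = c
    · subst hc; simp
    · have hne : ¬ ((ch.toNat : Int) = (c.toNat : Int)) := by
        intro hh
        exact hc (Char.ext (UInt32.toNat_inj.mp (by exact_mod_cast hh)))
      simp [hne, hc]
  unfold pvTranslateA pvTrB
  rw [show pvDictCharA = PySem.Dict.mk [((119 : Int), "a"), ((107 : Int), "b"), ((118 : Int), "c"), ((49 : Int), "d"), ((106 : Int), "e"), ((117 : Int), "f"), ((50 : Int), "g"), ((105 : Int), "h"), ((116 : Int), "i"), ((51 : Int), "j"), ((104 : Int), "k"), ((115 : Int), "l"), ((52 : Int), "m"), ((103 : Int), "n"), ((53 : Int), "o"), ((114 : Int), "p"), ((113 : Int), "q"), ((54 : Int), "r"), ((102 : Int), "s"), ((112 : Int), "t"), ((55 : Int), "u"), ((101 : Int), "v"), ((111 : Int), "w"), ((56 : Int), "1"), ((100 : Int), "2"), ((110 : Int), "3"), ((57 : Int), "4"), ((99 : Int), "5"), ((109 : Int), "6"), ((48 : Int), "7"), ((98 : Int), "8"), ((108 : Int), "9"), ((97 : Int), "0")] from by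 decide]
  rw [show pvCharMapB = PySem.Dict.mk [('w', 'a'), ('k', 'b'), ('v', 'c'), ('1', 'd'), ('j', 'e'), ('u', 'f'), ('2', 'g'), ('i', 'h'), ('t', 'i'), ('3', 'j'), ('h', 'k'), ('s', 'l'), ('4', 'm'), ('g', 'n'), ('5', 'o'), ('r', 'p'), ('q', 'q'), ('6', 'r'), ('f', 's'), ('p', 't'), ('7', 'u'), ('e', 'v'), ('o', 'w'), ('8', '1'), ('d', '2'), ('n', '3'), ('9', '4'), ('c', '5'), ('m', '6'), ('0', '7'), ('b', '8'), ('l', '9'), ('a', '0')] from by decide]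
  simp only [PySem.Dict.get?_mk_cons]
  rw [key 119 'w' rfl,
      key 107 'k' rfl,
      key 118 'v' rfl,
      key 49 '1' rfl,
      key 106 'j' rfl,
      key 117 'u' rfl,
      key 50 '2' rfl,
      key 105 'i' rfl,
      key 116 't' rfl,
      key 51 '3' rfl,
      key 104 'h' rfl,
      key 115 's' rfl,
      key 52 '4' rfl,
      key 103 'g' rfl,
      key 53 '5' rfl,
      key 114 'r' rfl,
      key 113 'q' rfl,
      key 54 '6' rfl,
      key 102 'f' rfl,
      key 112 'p' rfl,
      key 55 '7' rfl,
      key 101 'e' rfl,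
      key 111 'o' rfl,
      key 56 '8' rfl,
      key 100 'd' rfl,
      key 110 'n' rfl,
      key 57 '9' rfl,
      key 99 'c' rfl,
      key 109 'm' rfl,
      key 48 '0' rfl,
      key 98 'b' rfl,
      key 108 'l' rfl,
      key 97 'a' rfl]
  by_cases h0 : ('w' == c) = true
  · simp only [h0, if_true]; rfl
  rw [Bool.not_eq_true] at h0
  simp only [h0, Bool.false_eq_true, if_false]
  by_cases h1 : ('k' == c) = true
  · simp only [h1, if_true]; rfl
  rw [Bool.not_eq_true] at h1
  simp only [h1, Bool.false_eq_true, if_false]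
  by_cases h2 : ('v' == c) = true
  · simp only [h2, if_true]; rfl
  rw [Bool.not_eq_true] at h2
  simp only [h2, Bool.false_eq_true, if_false]
  by_cases h3 : ('1' == c) = true
  · simp only [h3, if_true]; rfl
  rw [Bool.not_eq_true] at h3
  simp only [h3, Bool.false_eq_true, if_false]
  by_cases h4 : ('j' == c) = true
  · simp only [h4, if_true]; rfl
  rw [Bool.not_eq_true] at h4
  simp only [h4, Bool.false_eq_true, if_false]
  by_cases h5 : ('u' == c) = true
  · simp only [h5, if_true]; rfl
  rw [Bool.not_eq_true] at h5
  simp only [h5, Bool.false_eq_true, if_false]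
  by_cases h6 : ('2' == c) = true
  · simp only [h6, if_true]; rfl
  rw [Bool.not_eq_true] at h6
  simp only [h6, Bool.false_eq_true, if_false]
  by_cases h7 : ('i' == c) = true
  · simp only [h7, if_true]; rfl
  rw [Bool.not_eq_true] at h7
  simp only [h7, Bool.false_eq_true, if_false]
  by_cases h8 : ('t' == c) = true
  · simp only [h8, if_true]; rfl
  rw [Bool.not_eq_true] at h8
  simp only [h8, Bool.false_eq_true, if_false]
  by_cases h9 : ('3' == c) = true
  · simp only [h9, if_true]; rfl
  rw [Bool.not_eq_true] at h9
  simp only [h9, Bool.false_eq_true, if_false]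
  by_cases h10 : ('h' == c) = true
  · simp only [h10, if_true]; rfl
  rw [Bool.not_eq_true] at h10
  simp only [h10, Bool.false_eq_true, if_false]
  by_cases h11 : ('s' == c) = true
  · simp only [h11, if_true]; rfl
  rw [Bool.not_eq_true] at h11
  simp only [h11, Bool.false_eq_true, if_false]
  by_cases h12 : ('4' == c) = true
  · simp only [h12, if_true]; rfl
  rw [Bool.not_eq_true] at h12
  simp only [h12, Bool.false_eq_true, if_false]
  by_cases h13 : ('g' == c) = true
  · simp only [h13, if_true]; rfl
  rw [Bool.not_eq_true] at h13
  simp only [h13, Bool.false_eq_true, if_false]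
  by_cases h14 : ('5' == c) = true
  · simp only [h14, if_true]; rfl
  rw [Bool.not_eq_true] at h14
  simp only [h14, Bool.false_eq_true, if_false]
  by_cases h15 : ('r' == c) = true
  · simp only [h15, if_true]; rfl
  rw [Bool.not_eq_true] at h15
  simp only [h15, Bool.false_eq_true, if_false]
  by_cases h16 : ('q' == c) = true
  · simp only [h16, if_true]; rfl
  rw [Bool.not_eq_true] at h16
  simp only [h16, Bool.false_eq_true, if_false]
  by_cases h17 : ('6' == c) = true
  · simp only [h17, if_true]; rfl
  rw [Bool.not_eq_true] at h17
  simp only [h17, Bool.false_eq_true, if_false]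
  by_cases h18 : ('f' == c) = true
  · simp only [h18, if_true]; rfl
  rw [Bool.not_eq_true] at h18
  simp only [h18, Bool.false_eq_true, if_false]
  by_cases h19 : ('p' == c) = true
  · simp only [h19, if_true]; rfl
  rw [Bool.not_eq_true] at h19
  simp only [h19, Bool.false_eq_true, if_false]
  by_cases h20 : ('7' == c) = true
  · simp only [h20, if_true]; rfl
  rw [Bool.not_eq_true] at h20
  simp only [h20, Bool.false_eq_true, if_false]
  by_cases h21 : ('e' == c) = true
  · simp only [h21, if_true]; rfl
  rw [Bool.not_eq_true] at h21
  simp only [h21, Bool.false_eq_true, if_false]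
  by_cases h22 : ('o' == c) = true
  · simp only [h22, if_true]; rfl
  rw [Bool.not_eq_true] at h22
  simp only [h22, Bool.false_eq_true, if_false]
  by_cases h23 : ('8' == c) = true
  · simp only [h23, if_true]; rfl
  rw [Bool.not_eq_true] at h23
  simp only [h23, Bool.false_eq_true, if_false]
  by_cases h24 : ('d' == c) = true
  · simp only [h24, if_true]; rfl
  rw [Bool.not_eq_true] at h24
  simp only [h24, Bool.false_eq_true, if_false]
  by_cases h25 : ('n' == c) = true
  · simp only [h25, if_true]; rfl
  rw [Bool.not_eq_true] at h25
  simp only [h25, Bool.false_eq_true, if_false]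
  by_cases h26 : ('9' == c) = true
  · simp only [h26, if_true]; rfl
  rw [Bool.not_eq_true] at h26
  simp only [h26, Bool.false_eq_true, if_false]
  by_cases h27 : ('c' == c) = true
  · simp only [h27, if_true]; rfl
  rw [Bool.not_eq_true] at h27
  simp only [h27, Bool.false_eq_true, if_false]
  by_cases h28 : ('m' == c) = true
  · simp only [h28, if_true]; rfl
  rw [Bool.not_eq_true] at h28
  simp only [h28, Bool.false_eq_true, if_false]
  by_cases h29 : ('0' == c) = true
  · simp only [h29, if_true]; rfl
  rw [Bool.not_eq_true] at h29
  simp only [h29, Bool.false_eq_true, if_false]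
  by_cases h30 : ('b' == c) = true
  · simp only [h30, if_true]; rfl
  rw [Bool.not_eq_true] at h30
  simp only [h30, Bool.false_eq_true, if_false]
  by_cases h31 : ('l' == c) = true
  · simp only [h31, if_true]; rfl
  rw [Bool.not_eq_true] at h31
  simp only [h31, Bool.false_eq_true, if_false]
  by_cases h32 : ('a' == c) = true
  · simp only [h32, if_true]; rfl
  rw [Bool.not_eq_true] at h32
  simp only [h32, Bool.false_eq_true, if_false]
  rfl

theorem pvFlatMap_translate (l : List Char) :
    l.flatMap pvTranslateA = l.map pvTrB := by
  induction l with
  | nil => rfl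
  | cons c t ih => simp [List.flatMap_cons, pvTrA_eq, ih]

-- pass-through: the pvT1 replace pass walks straight over pvT2
theorem pvRep1_T2 (r : List Char) :
    pvRep pvT1 [':'] (pvT2 ++ r) = pvT2 ++ pvRep pvT1 [':'] r := by
  rw [show pvT2 ++ r = '_'::'z'::'&'::'e'::'3'::'B'::r from rfl]
  rw [pvRep_neg _ _ _ _ (by simp [pvT1, List.cons_prefix_cons]),
      pvRep_neg _ _ _ _ (by simp [pvT1, List.cons_prefix_cons]),
      pvRep_neg _ _ _ _ (by simp [pvT1, List.cons_prefix_cons]),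
      pvRep_neg _ _ _ _ (by simp [pvT1, List.cons_prefix_cons]),
      pvRep_neg _ _ _ _ (by simp [pvT1, List.cons_prefix_cons]),
      pvRep_neg _ _ _ _ (by simp [pvT1, List.cons_prefix_cons])]
  rfl

-- pass-through: the pvT1 replace pass walks straight over pvT3
theorem pvRep1_T3 (r : List Char) :
    pvRep pvT1 [':'] (pvT3 ++ r) = pvT3 ++ pvRep pvT1 [':'] r := by
  rw [show pvT3 ++ r = 'A'::'z'::'d'::'H'::'3'::'F'::r from rfl]
  rw [pvRep_neg _ _ _ _ (by simp [pvT1, List.cons_prefix_cons]),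
      pvRep_neg _ _ _ _ (by simp [pvT1, List.cons_prefix_cons]),
      pvRep_neg _ _ _ _ (by simp [pvT1, List.cons_prefix_cons]),
      pvRep_neg _ _ _ _ (by simp [pvT1, List.cons_prefix_cons]),
      pvRep_neg _ _ _ _ (by simp [pvT1, List.cons_prefix_cons]),
      pvRep_neg _ _ _ _ (by simp [pvT1, List.cons_prefix_cons])]
  rfl

-- pass-through: the pvT2 replace pass walks straight over pvT3
theorem pvRep2_T3 (r : List Char) :
    pvRep pvT2 ['.'] (pvT3 ++ r) = pvT3 ++ pvRep pvT2 ['.'] r := by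
  rw [show pvT3 ++ r = 'A'::'z'::'d'::'H'::'3'::'F'::r from rfl]
  rw [pvRep_neg _ _ _ _ (by simp [pvT2, List.cons_prefix_cons]),
      pvRep_neg _ _ _ _ (by simp [pvT2, List.cons_prefix_cons]),
      pvRep_neg _ _ _ _ (by simp [pvT2, List.cons_prefix_cons]),
      pvRep_neg _ _ _ _ (by simp [pvT2, List.cons_prefix_cons]),
      pvRep_neg _ _ _ _ (by simp [pvT2, List.cons_prefix_cons]),
      pvRep_neg _ _ _ _ (by simp [pvT2, List.cons_prefix_cons])]
  rfl

-- matching: the pvT1 replace pass consumes pvT1 at the front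
theorem pvRep1_pos (r : List Char) :
    pvRep pvT1 [':'] (pvT1 ++ r) = ':' :: pvRep pvT1 [':'] r := by
  rw [show pvT1 ++ r = '_' :: (['z','2','C','$','q'] ++ r) from rfl]
  rw [pvRep_pos pvT1 [':'] '_' (['z','2','C','$','q'] ++ r) (by exact List.prefix_append pvT1 r)]
  rfl

-- matching: the pvT2 replace pass consumes pvT2 at the front
theorem pvRep2_pos (r : List Char) :
    pvRep pvT2 ['.'] (pvT2 ++ r) = '.' :: pvRep pvT2 ['.'] r := by
  rw [show pvT2 ++ r = '_' :: (['z','&','e','3','B'] ++ r) from rfl]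
  rw [pvRep_pos pvT2 ['.'] '_' (['z','&','e','3','B'] ++ r) (by exact List.prefix_append pvT2 r)]
  rfl

-- matching: the pvT3 replace pass consumes pvT3 at the front
theorem pvRep3_pos (r : List Char) :
    pvRep pvT3 ['/'] (pvT3 ++ r) = '/' :: pvRep pvT3 ['/'] r := by
  rw [show pvT3 ++ r = 'A' :: (['z','d','H','3','F'] ++ r) from rfl]
  rw [pvRep_pos pvT3 ['/'] 'A' (['z','d','H','3','F'] ++ r) (by exact List.prefix_append pvT3 r)]
  rfl

-- main loop-fusion lemma: three rep passes + char map = B's single scan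
theorem pvFusion (l : List Char) :
    (pvRep pvT3 ['/'] (pvRep pvT2 ['.'] (pvRep pvT1 [':'] l))).map pvTrB
      = pvScanB l := by
  induction l using pvScanB.induct with
  | case1 => simp [pvRep_nil, pvScanB]
  | case2 c t h ih =>
    rw [pvScanB]
    simp only [h, if_true]
    obtain ⟨r, hr⟩ := (PySem.Chars.startswith_iff _ _).mp h
    replace hr : pvT1 ++ r = c :: t := hr
    have ht : t.drop 5 = r := by
      have h6 := congrArg (List.drop 6) hr
      exact (by simpa [pvT1] using h6 : r = t.drop 5).symm
    rw [ht] at ih ⊢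
    rw [← hr, pvRep1_pos,
        pvRep_neg pvT2 _ _ _ (by simp [pvT2, List.cons_prefix_cons]),
        pvRep_neg pvT3 _ _ _ (by simp [pvT3, List.cons_prefix_cons]),
        List.map_cons, show pvTrB ':' = ':' from by decide, ih]
  | case3 c t h1 h2 ih =>
    have h1' : PySem.Chars.startswith (c :: t) "_z2C$q".toList = false := by simpa using h1
    rw [pvScanB]
    simp only [h1', h2, Bool.false_eq_true, if_false, if_true]
    obtain ⟨r, hr⟩ := (PySem.Chars.startswith_iff _ _).mp h2
    replace hr : pvT2 ++ r = c :: t := hr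
    have ht : t.drop 5 = r := by
      have h6 := congrArg (List.drop 6) hr
      exact (by simpa [pvT2] using h6 : r = t.drop 5).symm
    rw [ht] at ih ⊢
    rw [← hr, pvRep1_T2, pvRep2_pos,
        pvRep_neg pvT3 _ _ _ (by simp [pvT3, List.cons_prefix_cons]),
        List.map_cons, show pvTrB '.' = '.' from by decide, ih]
  | case4 c t h1 h2 h3 ih =>
    have h1' : PySem.Chars.startswith (c :: t) "_z2C$q".toList = false := by simpa using h1
    have h2' : PySem.Chars.startswith (c :: t) "_z&e3B".toList = false := by simpa using h2
    rw [pvScanB]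
    simp only [h1', h2', h3, Bool.false_eq_true, if_false, if_true]
    obtain ⟨r, hr⟩ := (PySem.Chars.startswith_iff _ _).mp h3
    replace hr : pvT3 ++ r = c :: t := hr
    have ht : t.drop 5 = r := by
      have h6 := congrArg (List.drop 6) hr
      exact (by simpa [pvT3] using h6 : r = t.drop 5).symm
    rw [ht] at ih ⊢
    rw [← hr, pvRep1_T3, pvRep2_T3, pvRep3_pos,
        List.map_cons, show pvTrB '/' = '/' from by decide, ih]
  | case5 c t h1 h2 h3 ih =>
    have h1' : PySem.Chars.startswith (c :: t) "_z2C$q".toList = false := by simpa using h1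
    have h2' : PySem.Chars.startswith (c :: t) "_z&e3B".toList = false := by simpa using h2
    have h3' : PySem.Chars.startswith (c :: t) "AzdH3F".toList = false := by simpa using h3
    rw [pvScanB]
    simp only [h1', h2', h3', Bool.false_eq_true, if_false]
    have n1 : ¬ pvT1 <+: (c :: t) := fun hh =>
      h1 ((PySem.Chars.startswith_iff _ _).mpr hh)
    have n2 : ¬ pvT2 <+: (c :: t) := fun hh =>
      h2 ((PySem.Chars.startswith_iff _ _).mpr hh)
    have n3 : ¬ pvT3 <+: (c :: t) := fun hh =>
      h3 ((PySem.Chars.startswith_iff _ _).mpr hh)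
    have e1 : pvRep pvT1 [':'] (c :: t) = c :: pvRep pvT1 [':'] t :=
      pvRep_neg _ _ _ _ n1
    have p2 : ¬ pvT2 <+: (c :: pvRep pvT1 [':'] t) := by
      intro hh
      rw [← e1] at hh
      exact n2 (pvPrefix_rep pvT1 ':' pvT2 (by decide) (c :: t) hh)
    have e2 : pvRep pvT2 ['.'] (c :: pvRep pvT1 [':'] t)
        = c :: pvRep pvT2 ['.'] (pvRep pvT1 [':'] t) :=
      pvRep_neg _ _ _ _ p2
    have p3 : ¬ pvT3 <+: (c :: pvRep pvT2 ['.'] (pvRep pvT1 [':'] t)) := by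
      intro hh
      rw [← e2, ← e1] at hh
      have s1 := pvPrefix_rep pvT2 '.' pvT3 (by decide) (pvRep pvT1 [':'] (c :: t)) hh
      exact n3 (pvPrefix_rep pvT1 ':' pvT3 (by decide) (c :: t) s1)
    have e3 : pvRep pvT3 ['/'] (c :: pvRep pvT2 ['.'] (pvRep pvT1 [':'] t))
        = c :: pvRep pvT3 ['/'] (pvRep pvT2 ['.'] (pvRep pvT1 [':'] t)) :=
      pvRep_neg _ _ _ _ p3
    rw [e1, e2, e3, List.map_cons, ih]

-- A as the rep chain + char map
theorem pvA_eq (s : String) :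
    decipherUrl s
      = String.ofList ((pvRep pvT3 ['/'] (pvRep pvT2 ['.']
          (pvRep pvT1 [':'] s.toList))).map pvTrB) := by
  unfold decipherUrl
  rw [show pvDictStrA.items = [("_z2C$q", ":"), ("_z&e3B", "."), ("AzdH3F", "/")] from by decide]
  simp only [List.foldl]
  simp only [PySem.Str.toList_replace]
  rw [pvReplace_eq "_z2C$q".toList ":".toList s.toList (by decide)]
  rw [pvReplace_eq "_z&e3B".toList ".".toList _ (by decide)]
  rw [pvReplace_eq "AzdH3F".toList "/".toList _ (by decide)]
  rw [pvFlatMap_translate]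
  rfl

-- ===== VERDICT (by name: the statement is the Claim_ definition above) =====
theorem decipherUrl_spec : Claim_equal_decipherUrl := by
  intro s _
  unfold Spec_decipherUrl decipherUrl_alt
  rw [pvA_eq, pvFusion]
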